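-- pv_equiv track=rewrite | github.com/otomus/arqitect-server | arqitect/matching.py | _is_stem_match
-- ===== SOURCE A (Python) =====
-- MIN_SUBSTR_LEN = 4            # Minimum token length for stem matching
--
-- PREFIX_OVERLAP_RATIO = 0.75   # Required prefix overlap for stem matching
--
-- def _is_stem_match(a: str, b: str) -> bool:
--     """Check if two tokens are stem variants of the same word.
--
--     Only matches if:
--     - Both tokens are at least MIN_SUBSTR_LEN characters long
--     - They share a common prefix of at least PREFIX_OVERLAP_RATIO of the shorter
--       token's length AND at least MIN_SUBSTR_LEN characters
--     This catches morphological variants (calculate/calculating, translate/translation)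
--     while preventing spurious matches (do/document, info/information, log/location).
--     """
--     if len(a) < MIN_SUBSTR_LEN or len(b) < MIN_SUBSTR_LEN:
--         return False
--     shorter, longer = (a, b) if len(a) <= len(b) else (b, a)
--     # Find shared prefix length
--     prefix_len = 0
--     for ca, cb in zip(shorter, longer):
--         if ca != cb:
--             break
--         prefix_len += 1
--     # Require shared prefix covers at least 75% of the shorter word
--     # and is at least MIN_SUBSTR_LEN characters
--     return prefix_len >= MIN_SUBSTR_LEN and prefix_len >= len(shorter) * PREFIX_OVERLAP_RATIO
-- ===== SOURCE B (Python) =====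
-- MIN_SUBSTR_LEN = 4            # Minimum token length for stem matching
--
-- PREFIX_OVERLAP_RATIO = 0.75   # Required prefix overlap for stem matching
--
--
-- def _is_stem_match(a: str, b: str) -> bool:
--     """Same predicate, computed without the character-by-character scan:
--     the required shared-prefix length is fixed by the lengths alone, so
--     compute it once and compare the two prefixes with a single slice test.
--     ceil(n * 0.75) == (3*n + 3) // 4 exactly (0.75 is exact in binary)."""
--     if len(a) < MIN_SUBSTR_LEN or len(b) < MIN_SUBSTR_LEN:
--         return False
--     shorter, longer = (a, b) if len(a) <= len(b) else (b, a)
--     need = max(MIN_SUBSTR_LEN, (3 * len(shorter) + 3) // 4)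
--     return shorter[:need] == longer[:need]
-- ===== Notes on version B (the rewrite author's own statement) =====
-- stated objective: simpler
-- what changed: Replaces the char-by-char shared-prefix scan with a precomputed required prefix length need = max(4, ceil(0.75*len(shorter))) and a single slice-equality test shorter[:need] == longer[:need].
import Mathlib
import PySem

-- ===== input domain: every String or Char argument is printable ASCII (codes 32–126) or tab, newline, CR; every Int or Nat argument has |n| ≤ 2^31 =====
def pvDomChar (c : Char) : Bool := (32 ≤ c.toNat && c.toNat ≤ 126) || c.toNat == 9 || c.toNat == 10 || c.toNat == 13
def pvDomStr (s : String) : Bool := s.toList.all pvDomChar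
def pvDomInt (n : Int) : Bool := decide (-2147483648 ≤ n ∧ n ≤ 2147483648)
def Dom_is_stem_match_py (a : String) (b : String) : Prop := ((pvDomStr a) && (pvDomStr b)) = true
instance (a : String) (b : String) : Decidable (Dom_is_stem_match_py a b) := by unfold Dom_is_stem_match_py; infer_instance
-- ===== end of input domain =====

-- B computes the required prefix length once (max(4, ceil(0.75*len(shorter)))) and does one
-- slice-equality test instead of A's character-by-character shared-prefix scan (objective: simpler).


-- ===== PORT A =====
-- A's loop: prefix_len starts at 0 and counts matching pairs of zip(shorter, longer),
-- breaking at the first mismatch; structural recursion over the zipped list.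
def prefixLenA : List (Char × Char) → Nat
  | [] => 0
  | (ca, cb) :: t => if ca ≠ cb then 0 else prefixLenA t + 1

-- A's final test 'prefix_len >= 4 and prefix_len >= len(shorter) * 0.75';
-- '0.75' is exact in binary, so 'p >= n * 0.75' is exactly '4 * p >= 3 * n'.
def stemCheckA (shorter longer : List Char) : Bool :=
  decide (4 ≤ prefixLenA (shorter.zip longer) ∧
          3 * shorter.length ≤ 4 * prefixLenA (shorter.zip longer))

def is_stem_match_py (a : String) (b : String) : Bool :=
  if a.toList.length < 4 || b.toList.length < 4 then false
  else if a.toList.length ≤ b.toList.length then stemCheckA a.toList b.toList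
  else stemCheckA b.toList a.toList

-- ===== PORT B =====
-- B: need = max(4, (3*len(shorter)+3)//4); shorter[:need] == longer[:need]
-- (a slice s[:need] with need ≥ 0 is List.take need).
def stemCheckB (shorter longer : List Char) : Bool :=
  decide (shorter.take (max 4 ((3 * shorter.length + 3) / 4)) =
          longer.take (max 4 ((3 * shorter.length + 3) / 4)))

def is_stem_match_py_alt (a : String) (b : String) : Bool :=
  if a.toList.length < 4 || b.toList.length < 4 then false
  else if a.toList.length ≤ b.toList.length then stemCheckB a.toList b.toList
  else stemCheckB b.toList a.toList

-- ===== PRECONDITION & SPEC =====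
def Spec_is_stem_match_py (a : String) (b : String) (out : Bool) : Prop := out = is_stem_match_py_alt a b
instance (a : String) (b : String) (out : Bool) : Decidable (Spec_is_stem_match_py a b out) := by unfold Spec_is_stem_match_py; infer_instance

-- ===== CLAIM (what is proved, stated in full; the proofs are below) =====
def Claim_equal_is_stem_match_py : Prop := ∀ (a : String) (b : String), Dom_is_stem_match_py a b → Spec_is_stem_match_py a b (is_stem_match_py a b)

-- ===== LEMMAS AND PROOFS =====

-- Taking k ≤ both lengths: the two prefixes of length k agree iff the shared-prefix count reaches k.
theorem take_eq_iff_le_prefixLenA (k : Nat) (s l : List Char)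
    (hs : k ≤ s.length) (hl : k ≤ l.length) :
    (s.take k = l.take k) ↔ k ≤ prefixLenA (s.zip l) := by
  induction k generalizing s l with
  | zero => simp
  | succ k ih =>
    cases s with
    | nil => simp at hs
    | cons x s' =>
      cases l with
      | nil => simp at hl
      | cons y l' =>
        simp only [List.take_succ_cons, List.zip_cons_cons, prefixLenA, List.cons.injEq]
        by_cases hxy : x = y
        · subst hxy
          simp only [ne_eq, not_true_eq_false, if_false, true_and]
          rw [ih s' l' (by simpa using hs) (by simpa using hl)]
          omega
        · simp [hxy]

theorem stemCheck_eq (s l : List Char) (hs : 4 ≤ s.length) (hsl : s.length ≤ l.length) :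
    stemCheckA s l = stemCheckB s l := by
  unfold stemCheckA stemCheckB
  rw [decide_eq_decide]
  rw [take_eq_iff_le_prefixLenA (max 4 ((3 * s.length + 3) / 4)) s l (by omega) (by omega)]
  omega

-- ===== VERDICT (by name: the statement is the Claim_ definition above) =====
theorem is_stem_match_py_spec : Claim_equal_is_stem_match_py := by
  intro a b _
  unfold Spec_is_stem_match_py is_stem_match_py is_stem_match_py_alt
  split_ifs with h0 h1
  · rfl
  · exact stemCheck_eq _ _ (by simp only [Bool.or_eq_true, decide_eq_true_eq, not_or, not_lt] at h0; omega) h1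
  · exact stemCheck_eq _ _ (by simp only [Bool.or_eq_true, decide_eq_true_eq, not_or, not_lt] at h0; omega) (by omega)
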